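-- pv_equiv track=rewrite | github.com/WallerTsai/OJ-Solution | leetcode-py/动态规划/状态机DP/No3628.py | numOfSubsequences
-- ===== SOURCE A (Python) =====
-- def numOfSubsequences(s: str) -> int:
--     cnt_t = s.count("T")
--     cnt_l = cnt_lc = cnt_lct = cnt_c = cnt_ct = cnt_lt = 0
--     # 如果添加 L 贪心的想 肯定添加在最左边 ans += cnt_ct(随遍历单调增)
--     # 如果添加 T 贪心的想 肯定添加在最右边 ans += cnt_lc(随遍历单调增)
--     # 如果添加 C 则需要遍历找 cnt_lt 最大值
--     for ch in s:
--
--         if ch == "L":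
--             cnt_l += 1
--         elif ch == "C":
--             cnt_lc += cnt_l
--             cnt_c += 1
--         elif ch == "T":
--             cnt_lct += cnt_lc
--             cnt_ct += cnt_c
--             cnt_t -= 1
--
--         cnt_lt = max(cnt_lt, cnt_l * cnt_t)
--
--     return cnt_lct + max(cnt_lc, cnt_ct, cnt_lt)    # 235ms
-- ===== SOURCE B (Python) =====
-- def numOfSubsequences(s: str) -> int:
--     # Phase 1: forward subsequence DP for the existing counts.
--     l = lc = lct = c = ct = 0
--     for ch in s:
--         if ch == "L":
--             l += 1
--         elif ch == "C":
--             lc += l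
--             c += 1
--         elif ch == "T":
--             lct += lc
--             ct += c
--     # Phase 2: suffix 'T' counts, built right-to-left: suff_t[i] = #T in s[i:].
--     suff_t = []
--     t = 0
--     for ch in reversed(s):
--         t += (ch == "T")
--         suff_t.append(t)
--     suff_t.reverse()
--     # Phase 3: best gain from inserting one 'C' at some split boundary:
--     # max over boundaries of (#L before) * (#T after).
--     best = 0
--     pref_l = 0
--     for ch, tb in zip(s, suff_t):
--         best = max(best, pref_l * tb)
--         pref_l += (ch == "L")
--     return lct + max(lc, ct, best)
-- ===== Notes on version B (the rewrite author's own statement) =====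
-- stated objective: alternative
-- what changed: Replaces the fused seven-variable single loop by three clearly-shaped passes: a forward subsequence DP for L/LC/LCT/C/CT, a right-to-left pass building the suffix-T table, and a boundary scan maximising prefixL * suffixT for the insert-C gain.
import Mathlib
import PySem

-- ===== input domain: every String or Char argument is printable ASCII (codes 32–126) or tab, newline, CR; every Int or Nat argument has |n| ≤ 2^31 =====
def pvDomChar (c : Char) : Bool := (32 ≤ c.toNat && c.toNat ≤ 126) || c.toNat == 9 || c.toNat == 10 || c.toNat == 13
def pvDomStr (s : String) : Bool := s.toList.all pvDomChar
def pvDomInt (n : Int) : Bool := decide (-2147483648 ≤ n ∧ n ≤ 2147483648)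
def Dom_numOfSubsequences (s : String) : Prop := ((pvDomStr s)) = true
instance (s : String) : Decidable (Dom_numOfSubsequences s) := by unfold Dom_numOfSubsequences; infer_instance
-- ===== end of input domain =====

-- B replaces A's fused seven-variable loop by three separate passes (forward DP, suffix-T table, boundary scan); alternative decomposition, same O(n) cost; equivalence proved for all strings.


-- ===== PORT A =====
-- A's loop body: state (cnt_t, cnt_l, cnt_lc, cnt_lct, cnt_c, cnt_ct, cnt_lt);
-- the trailing 'cnt_lt = max(cnt_lt, cnt_l*cnt_t)' is applied in every branch with that branch's updated values.
def pvStepA (st : Int × Int × Int × Int × Int × Int × Int) (ch : Char) :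
    Int × Int × Int × Int × Int × Int × Int :=
  let t := st.1
  let l := st.2.1
  let lc := st.2.2.1
  let lct := st.2.2.2.1
  let c := st.2.2.2.2.1
  let ct := st.2.2.2.2.2.1
  let lt := st.2.2.2.2.2.2
  if ch = 'L' then (t, l+1, lc, lct, c, ct, max lt ((l+1)*t))
  else if ch = 'C' then (t, l, lc+l, lct, c+1, ct, max lt (l*t))
  else if ch = 'T' then (t-1, l, lc, lct+lc, c, ct+c, max lt (l*(t-1)))
  else (t, l, lc, lct, c, ct, max lt (l*t))

def numOfSubsequences (s : String) : Int :=
  let st := s.toList.foldl pvStepA ((PySem.Str.count s "T" : Int), 0, 0, 0, 0, 0, 0)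
  st.2.2.2.1 + max (max st.2.2.1 st.2.2.2.2.2.1) st.2.2.2.2.2.2

-- ===== PORT B =====
-- Phase 1 step: state (l, lc, lct, c, ct)
def pvStepB1 (st : Int × Int × Int × Int × Int) (ch : Char) : Int × Int × Int × Int × Int :=
  let l := st.1
  let lc := st.2.1
  let lct := st.2.2.1
  let c := st.2.2.2.1
  let ct := st.2.2.2.2
  if ch = 'L' then (l+1, lc, lct, c, ct)
  else if ch = 'C' then (l, lc+l, lct, c+1, ct)
  else if ch = 'T' then (l, lc, lct+lc, c, ct+c)
  else st

-- Phase 2 step: state (t, suff_t list being appended to)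
def pvStepB2 (st : Int × List Int) (ch : Char) : Int × List Int :=
  let t := st.1 + (if ch = 'T' then 1 else 0)
  (t, st.2 ++ [t])

-- Phase 3 step: state (best, pref_l), input (ch, tb)
def pvStepB3 (st : Int × Int) (p : Char × Int) : Int × Int :=
  (max st.1 (st.2 * p.2), st.2 + (if p.1 = 'L' then 1 else 0))

def numOfSubsequences_alt (s : String) : Int :=
  let cs := s.toList
  let p := cs.foldl pvStepB1 (0, 0, 0, 0, 0)
  let q := cs.reverse.foldl pvStepB2 (0, [])
  let suffT := q.2.reverse
  let r := (cs.zip suffT).foldl pvStepB3 (0, 0)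
  p.2.2.1 + max (max p.2.1 p.2.2.2.2) r.1

-- ===== PRECONDITION & SPEC =====
def Spec_numOfSubsequences (s : String) (out : Int) : Prop := out = numOfSubsequences_alt s
instance (s : String) (out : Int) : Decidable (Spec_numOfSubsequences s out) := by unfold Spec_numOfSubsequences; infer_instance

-- ===== CLAIM (what is proved, stated in full; the proofs are below) =====
def Claim_equal_numOfSubsequences : Prop := ∀ (s : String), Dom_numOfSubsequences s → Spec_numOfSubsequences s (numOfSubsequences s)

-- ===== LEMMAS AND PROOFS =====

-- character counters (as Int)
def pvCntT : List Char → Int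
  | [] => 0
  | c :: cs => (if c = 'T' then 1 else 0) + pvCntT cs

def pvCntL : List Char → Int
  | [] => 0
  | c :: cs => (if c = 'L' then 1 else 0) + pvCntL cs

def pvCntC : List Char → Int
  | [] => 0
  | c :: cs => (if c = 'C' then 1 else 0) + pvCntC cs

-- subsequence-pair/triple counts
def pvFCT : List Char → Int
  | [] => 0
  | c :: cs => (if c = 'C' then pvCntT cs else 0) + pvFCT cs

def pvFLC : List Char → Int
  | [] => 0
  | c :: cs => (if c = 'L' then pvCntC cs else 0) + pvFLC cs

def pvFLCT : List Char → Int
  | [] => 0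
  | c :: cs => (if c = 'L' then pvFCT cs else 0) + pvFLCT cs

-- the products A's cnt_lt is a running max of
def pvLtList : Int → Int → List Char → List Int
  | _, _, [] => []
  | t, l, c :: cs =>
    let l' := l + (if c = 'L' then 1 else 0)
    let t' := t - (if c = 'T' then 1 else 0)
    l' * t' :: pvLtList t' l' cs

-- the products B's phase 3 is a running max of
def pvProds : Int → List Char → List Int → List Int
  | _, [], _ => []
  | _, _ :: _, [] => []
  | p, c :: cs, t :: ts => p * t :: pvProds (p + (if c = 'L' then 1 else 0)) cs ts

-- suffix-T table, structurally
def pvSuff : List Char → List Int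
  | [] => []
  | c :: cs => pvCntT (c :: cs) :: pvSuff cs

-- running partial sums of T-indicators (what phase 2 appends)
def pvG : Int → List Char → List Int
  | _, [] => []
  | t, c :: l => (t + (if c = 'T' then 1 else 0)) :: pvG (t + (if c = 'T' then 1 else 0)) l


theorem pvNeLC : ¬(('L':Char) = 'C') := by decide
theorem pvNeLT : ¬(('L':Char) = 'T') := by decide
theorem pvNeCL : ¬(('C':Char) = 'L') := by decide
theorem pvNeCT : ¬(('C':Char) = 'T') := by decide
theorem pvNeTL : ¬(('T':Char) = 'L') := by decide
theorem pvNeTC : ¬(('T':Char) = 'C') := by decide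

theorem pv_lemA (cs : List Char) : ∀ (t l lc lct c ct lt : Int),
    cs.foldl pvStepA (t, l, lc, lct, c, ct, lt) =
      (t - pvCntT cs, l + pvCntL cs, lc + l * pvCntC cs + pvFLC cs,
       lct + lc * pvCntT cs + l * pvFCT cs + pvFLCT cs,
       c + pvCntC cs, ct + c * pvCntT cs + pvFCT cs,
       (pvLtList t l cs).foldl max lt) := by
  induction cs with
  | nil => intro t l lc lct c ct lt; simp [pvCntT, pvCntL, pvCntC, pvFLC, pvFCT, pvFLCT, pvLtList]
  | cons ch cs ih =>
    intro t l lc lct c ct lt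
    by_cases hL : ch = 'L'
    · subst hL
      simp [pvStepA, ih, pvCntT, pvCntL, pvCntC, pvFLC, pvFCT, pvFLCT, pvLtList,
        pvNeLC, pvNeLT, Prod.mk.injEq]
      try (and_intros <;> try ring)
    · by_cases hC : ch = 'C'
      · subst hC
        simp [pvStepA, ih, pvCntT, pvCntL, pvCntC, pvFLC, pvFCT, pvFLCT, pvLtList,
          pvNeCL, pvNeCT, Prod.mk.injEq]
        try (and_intros <;> try ring)
      · by_cases hT : ch = 'T'
        · subst hT
          simp [pvStepA, ih, pvCntT, pvCntL, pvCntC, pvFLC, pvFCT, pvFLCT, pvLtList,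
            pvNeTL, pvNeTC, Prod.mk.injEq]
          try (and_intros <;> try ring)
        · simp [pvStepA, ih, pvCntT, pvCntL, pvCntC, pvFLC, pvFCT, pvFLCT, pvLtList,
            hL, hC, hT]

theorem pv_lemB1 (cs : List Char) : ∀ (l lc lct c ct : Int),
    cs.foldl pvStepB1 (l, lc, lct, c, ct) =
      (l + pvCntL cs, lc + l * pvCntC cs + pvFLC cs,
       lct + lc * pvCntT cs + l * pvFCT cs + pvFLCT cs,
       c + pvCntC cs, ct + c * pvCntT cs + pvFCT cs) := by
  induction cs with
  | nil => intro l lc lct c ct; simp [pvCntT, pvCntL, pvCntC, pvFLC, pvFCT, pvFLCT]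
  | cons ch cs ih =>
    intro l lc lct c ct
    by_cases hL : ch = 'L'
    · subst hL
      simp [pvStepB1, ih, pvCntT, pvCntL, pvCntC, pvFLC, pvFCT, pvFLCT,
        pvNeLC, pvNeLT, Prod.mk.injEq]
      try (and_intros <;> try ring)
    · by_cases hC : ch = 'C'
      · subst hC
        simp [pvStepB1, ih, pvCntT, pvCntL, pvCntC, pvFLC, pvFCT, pvFLCT,
          pvNeCL, pvNeCT, Prod.mk.injEq]
        try (and_intros <;> try ring)
      · by_cases hT : ch = 'T'
        · subst hT
          simp [pvStepB1, ih, pvCntT, pvCntL, pvCntC, pvFLC, pvFCT, pvFLCT,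
            pvNeTL, pvNeTC, Prod.mk.injEq]
          try (and_intros <;> try ring)
        · simp [pvStepB1, ih, pvCntT, pvCntL, pvCntC, pvFLC, pvFCT, pvFLCT,
            hL, hC, hT]

theorem pv_cntT_append (xs ys : List Char) : pvCntT (xs ++ ys) = pvCntT xs + pvCntT ys := by
  induction xs with
  | nil => simp [pvCntT]
  | cons c xs ih => simp [pvCntT, ih]; ring

theorem pv_cntT_reverse (xs : List Char) : pvCntT xs.reverse = pvCntT xs := by
  induction xs with
  | nil => rfl
  | cons c xs ih => simp [List.reverse_cons, pv_cntT_append, pvCntT, ih]; ring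

theorem pv_g_append (xs : List Char) : ∀ (ys : List Char) (t : Int),
    pvG t (xs ++ ys) = pvG t xs ++ pvG (t + pvCntT xs) ys := by
  induction xs with
  | nil => intro ys t; simp [pvG, pvCntT]
  | cons c xs ih => intro ys t; simp [pvG, pvCntT, ih]; ring_nf

theorem pv_lemB2 (l : List Char) : ∀ (t : Int) (acc : List Int),
    l.foldl pvStepB2 (t, acc) = (t + pvCntT l, acc ++ pvG t l) := by
  induction l with
  | nil => intro t acc; simp [pvCntT, pvG]
  | cons c l ih =>
    intro t acc
    simp only [List.foldl_cons, pvStepB2, ih, pvCntT, pvG, Prod.mk.injEq]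
    refine ⟨by ring, by simp⟩

theorem pv_suff_eq (cs : List Char) : (pvG 0 cs.reverse).reverse = pvSuff cs := by
  induction cs with
  | nil => rfl
  | cons c cs ih =>
    rw [List.reverse_cons, pv_g_append, List.reverse_append]
    simp only [pvG, List.reverse_cons, List.reverse_nil, List.nil_append]
    rw [ih, pv_cntT_reverse]
    simp only [pvSuff, pvCntT, List.singleton_append]
    rw [show (0:Int) + pvCntT cs + (if c = 'T' then 1 else 0)
          = (if c = 'T' then 1 else 0) + pvCntT cs by ring]

theorem pv_lemB3 (cs : List Char) : ∀ (ts : List Int) (best p : Int),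
    ((cs.zip ts).foldl pvStepB3 (best, p)).1 = (pvProds p cs ts).foldl max best := by
  induction cs with
  | nil => intro ts best p; simp [pvProds]
  | cons c cs ih =>
    intro ts best p
    cases ts with
    | nil => simp [pvProds]
    | cons t ts => simp only [List.zip_cons_cons, List.foldl_cons, pvStepB3, ih, pvProds]

theorem pv_bridge (cs : List Char) : ∀ (l : Int),
    pvProds l cs (pvSuff cs) ++ [(l + pvCntL cs) * 0] =
      l * pvCntT cs :: pvLtList (pvCntT cs) l cs := by
  induction cs with
  | nil => intro l; simp [pvProds, pvLtList, pvCntT]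
  | cons c cs ih =>
    intro l
    have h : pvCntT (c :: cs) - (if c = 'T' then 1 else 0) = pvCntT cs := by
      simp only [pvCntT]; ring
    simp only [pvSuff, pvProds, pvLtList, List.cons_append, List.cons.injEq, pvCntL, h]
    refine ⟨trivial, ?_⟩
    rw [show l + ((if c = 'L' then 1 else 0) + pvCntL cs)
          = (l + (if c = 'L' then 1 else 0)) + pvCntL cs by ring]
    exact ih _

theorem pv_le_foldl_max (xs : List Int) : ∀ (b : Int), b ≤ xs.foldl max b := by
  induction xs with
  | nil => intro b; simp
  | cons x xs ih => intro b; exact le_trans (le_max_left b x) (ih (max b x))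

theorem pv_max_eq (cs : List Char) :
    (pvProds 0 cs (pvSuff cs)).foldl max 0 = (pvLtList (pvCntT cs) 0 cs).foldl max 0 := by
  have h := pv_bridge cs 0
  have h2 : ((pvProds 0 cs (pvSuff cs)) ++ [(0 + pvCntL cs) * 0]).foldl max 0
      = (0 * pvCntT cs :: pvLtList (pvCntT cs) 0 cs).foldl max 0 := by rw [h]
  rw [List.foldl_append] at h2
  simp only [List.foldl_cons, List.foldl_nil, mul_zero, zero_mul, max_self] at h2
  rw [max_eq_left (pv_le_foldl_max _ 0)] at h2
  exact h2

-- s.count("T") is the number of 'T' characters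
theorem pv_count_go_single (c : Char) (l : List Char) : ∀ (fuel acc : Nat),
    l.length ≤ fuel → PySem.Chars.count.go [c] fuel l acc = acc + l.count c := by
  induction l with
  | nil =>
    intro fuel acc _
    cases fuel <;> simp [PySem.Chars.count.go]
  | cons h t ih =>
    intro fuel acc hf
    cases fuel with
    | zero => simp at hf
    | succ fuel =>
      rw [PySem.Chars.count.go]
      simp only [List.isPrefixOf, List.length_cons] at *
      by_cases hc : c = h
      · simp [hc]
        rw [← hc, ih fuel (acc + 1) (by omega)]
        omega
      · have : (c == h) = false := by simp [hc]
        simp [this, Ne.symm hc, ih fuel acc (by omega)]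

theorem pv_cntT_eq_count (cs : List Char) : pvCntT cs = (cs.count 'T' : Int) := by
  induction cs with
  | nil => rfl
  | cons c cs ih =>
    by_cases h : c = 'T'
    · simp [pvCntT, h, ih]; ring
    · simp [pvCntT, h, ih]

theorem pv_strcount (s : String) : (PySem.Str.count s "T" : Int) = pvCntT s.toList := by
  rw [PySem.Str.count_eq]
  have h : ("T" : String).toList = ['T'] := by decide
  rw [h]
  unfold PySem.Chars.count
  simp only [List.isEmpty_cons, if_false, Bool.false_eq_true]
  rw [pv_count_go_single 'T' s.toList s.toList.length 0 le_rfl, pv_cntT_eq_count]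
  simp

-- ===== VERDICT (by name: the statement is the Claim_ definition above) =====
theorem numOfSubsequences_spec : Claim_equal_numOfSubsequences := by
  intro s _
  unfold Spec_numOfSubsequences numOfSubsequences numOfSubsequences_alt
  simp only [pv_strcount, pv_lemA, pv_lemB1, pv_lemB2, pv_lemB3]
  simp [pv_max_eq, pv_suff_eq]
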